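-- pv_equiv track=rewrite | github.com/OgradL/esercizi-olinfo | Bitwise party/andxor.py | max_numbers
-- ===== SOURCE A (Python) =====
-- def max_numbers(numbers):
--     if len(numbers) == 1:
--         record = int(bool(numbers[0]))
--         record_and = numbers[0]
--         record_xor = numbers[0]
--     else:
--         record = 0
--         record_and = 0
--         record_xor = 0
--
--         n = 0
--         while n < len(numbers):
--             mx_n, mx_and, mx_xor = max_numbers(numbers[:n:])
--
--             mx_and = mx_and & numbers[n]
--             mx_xor = mx_xor ^ numbers[n]
--
--             if mx_and and mx_xor:
--                 mx_n += 1
--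
--             if  mx_n > record:
--                 record = mx_n
--                 record_and = mx_and
--                 record_xor = mx_xor
--
--             n+=1
--
--     return record, record_and, record_xor
-- ===== SOURCE B (Python) =====
-- def max_numbers(numbers):
--     L = len(numbers)
--     if L == 1:
--         x = numbers[0]
--         return ((1 if x else 0), x, x)
--     # bottom-up DP over prefix lengths: res[k] = result for numbers[:k]
--     res = [(0, 0, 0)]
--     if L >= 1:
--         x = numbers[0]
--         res.append(((1 if x else 0), x, x))
--     for k in range(2, L + 1):
--         best = (0, 0, 0)
--         for n in range(k):
--             mn, ma, mx = res[n]
--             ma &= numbers[n]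
--             mx ^= numbers[n]
--             if ma and mx:
--                 mn += 1
--             if mn > best[0]:
--                 best = (mn, ma, mx)
--         res.append(best)
--     return res[L]
-- ===== Notes on version B (the rewrite author's own statement) =====
-- stated objective: faster
-- what changed: Replaced A's exponential naive recursion over every prefix (each prefix recomputed from scratch) by a bottom-up dynamic program that fills a table of prefix results once, reading each earlier prefix's cached triple.
import Mathlib
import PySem

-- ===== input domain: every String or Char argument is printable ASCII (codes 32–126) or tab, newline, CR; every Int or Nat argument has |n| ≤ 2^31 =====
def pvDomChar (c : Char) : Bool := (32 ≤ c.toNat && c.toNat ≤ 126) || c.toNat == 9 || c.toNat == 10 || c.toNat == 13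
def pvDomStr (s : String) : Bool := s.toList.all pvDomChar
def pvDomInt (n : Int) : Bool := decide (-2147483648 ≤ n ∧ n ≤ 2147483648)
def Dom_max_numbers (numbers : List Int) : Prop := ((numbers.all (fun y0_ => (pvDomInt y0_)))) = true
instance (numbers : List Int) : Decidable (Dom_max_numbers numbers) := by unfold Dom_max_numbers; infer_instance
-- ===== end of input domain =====

-- B replaces A's exponential naive recursion over prefixes by a bottom-up DP table of prefix results (faster, asymptotic).


-- ===== PORT A =====
-- A's naive recursion: for each n < len(numbers), recursively solve the prefix numbers[:n] and combine
-- with numbers[n]; the while loop is the foldl over range.  The fuel argument (called with fuel =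
-- numbers.length, strictly decreasing across the recursive calls on strict prefixes) only makes the
-- recursion structural; it never alters the computed value.
def maxCoreF (fuel : Nat) (numbers : List Int) : Int × Int × Int :=
  match fuel with
  | 0 => (0, 0, 0)
  | fuel + 1 =>
    if numbers.length = 1 then
      (if numbers.headI ≠ 0 then 1 else 0, numbers.headI, numbers.headI)
    else
      (List.range numbers.length).foldl
        (fun st n =>
          let r := maxCoreF fuel (numbers.take n)
          let ma := PySem.Int.band r.2.1 (numbers.getD n 0)
          let mx := PySem.Int.bxor r.2.2 (numbers.getD n 0)
          let mn := if ma ≠ 0 ∧ mx ≠ 0 then r.1 + 1 else r.1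
          if mn > st.1 then (mn, ma, mx) else st)
        (0, 0, 0)

def max_numbers (numbers : List Int) : List Int :=
  let r := maxCoreF numbers.length numbers
  [r.1, r.2.1, r.2.2]

-- ===== PORT B =====
-- B's inner loop: best candidate for prefix length k, reading cached triples from the table res.
def altBest (numbers : List Int) (res : List (Int × Int × Int)) (k : Nat) : Int × Int × Int :=
  (List.range k).foldl
    (fun best n =>
      let r := res.getD n (0, 0, 0)
      let ma := PySem.Int.band r.2.1 (numbers.getD n 0)
      let mx := PySem.Int.bxor r.2.2 (numbers.getD n 0)
      let mn := if ma ≠ 0 ∧ mx ≠ 0 then r.1 + 1 else r.1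
      if mn > best.1 then (mn, ma, mx) else best)
    (0, 0, 0)

def max_numbers_alt (numbers : List Int) : List Int :=
  let L := numbers.length
  if L = 1 then
    [if numbers.headI ≠ 0 then 1 else 0, numbers.headI, numbers.headI]
  else
    let res0 : List (Int × Int × Int) := [(0, 0, 0)]
    let res1 := if 1 ≤ L then
        res0 ++ [((if numbers.headI ≠ 0 then (1 : Int) else 0), numbers.headI, numbers.headI)]
      else res0
    let res := (List.range' 2 (L - 1)).foldl (fun res k => res ++ [altBest numbers res k]) res1
    let r := res.getD L (0, 0, 0)
    [r.1, r.2.1, r.2.2]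

-- ===== PRECONDITION & SPEC =====
def Spec_max_numbers (numbers : List Int) (out : List Int) : Prop := out = max_numbers_alt numbers
instance (numbers : List Int) (out : List Int) : Decidable (Spec_max_numbers numbers out) := by unfold Spec_max_numbers; infer_instance

-- ===== CLAIM (what is proved, stated in full; the proofs are below) =====
def Claim_equal_max_numbers : Prop := ∀ (numbers : List Int), Dom_max_numbers numbers → Spec_max_numbers numbers (max_numbers numbers)

-- ===== LEMMAS AND PROOFS =====

theorem maxCoreF_nil (fuel : Nat) : maxCoreF fuel [] = (0, 0, 0) := by
  cases fuel <;> simp [maxCoreF]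

-- the fuel is irrelevant as long as it covers the list's length
theorem maxCoreF_stable (f1 : Nat) : ∀ (f2 : Nat) (l : List Int),
    l.length ≤ f1 → l.length ≤ f2 → maxCoreF f1 l = maxCoreF f2 l := by
  induction f1 with
  | zero =>
      intro f2 l h1 _
      have : l = [] := List.length_eq_zero_iff.mp (by omega)
      subst this
      simp [maxCoreF_nil]
  | succ f1 ih =>
      intro f2 l h1 h2
      cases f2 with
      | zero =>
          have : l = [] := List.length_eq_zero_iff.mp (by omega)
          subst this
          simp [maxCoreF_nil]
      | succ f2 =>
          rw [maxCoreF, maxCoreF]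
          by_cases hl : l.length = 1
          · rw [if_pos hl, if_pos hl]
          · rw [if_neg hl, if_neg hl]
            refine PySem.List.foldl_congr_mem _ _ _ _ ?_
            intro acc n hn
            have hnl : n < l.length := List.mem_range.mp hn
            have : maxCoreF f1 (l.take n) = maxCoreF f2 (l.take n) := by
              apply ih
              · simp [List.length_take]; omega
              · simp [List.length_take]; omega
            simp only [this]

theorem maxCoreF_one_take (numbers : List Int) (h : 1 ≤ numbers.length) :
    maxCoreF 1 (numbers.take 1) =
      (if numbers.headI ≠ 0 then 1 else 0, numbers.headI, numbers.headI) := by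
  cases numbers with
  | nil => simp at h
  | cons a l => rw [maxCoreF]; simp

-- A's recursion at prefix length k is exactly B's inner loop read off the table of shorter prefixes
theorem maxCoreF_take_eq_altBest (numbers : List Int) (k : Nat) (hk : k ≤ numbers.length)
    (hk1 : k ≠ 1) :
    maxCoreF k (numbers.take k) =
      altBest numbers ((List.range k).map (fun n => maxCoreF n (numbers.take n))) k := by
  cases k with
  | zero => simp [maxCoreF, altBest]
  | succ m =>
      have hlen : (numbers.take (m + 1)).length = m + 1 := by simp [Nat.min_eq_left hk]
      rw [maxCoreF, if_neg (by rw [hlen]; exact hk1), hlen, altBest]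
      refine PySem.List.foldl_congr_mem _ _ _ _ ?_
      intro acc n hn
      have hnk : n < m + 1 := List.mem_range.mp hn
      have h1 : (numbers.take (m + 1)).take n = numbers.take n := by
        rw [List.take_take]; simp [Nat.min_eq_left (by omega : n ≤ m + 1)]
      have h2 : (numbers.take (m + 1)).getD n 0 = numbers.getD n 0 := by
        simp [List.getD_eq_getElem?_getD, hnk]
      have h3 : maxCoreF m (numbers.take n) = maxCoreF n (numbers.take n) := by
        exact maxCoreF_stable m n (numbers.take n) (by simp [List.length_take]; omega)
          (by simp [List.length_take])
      have h4 : (((List.range (m + 1)).map (fun n => maxCoreF n (numbers.take n))).getD n (0, 0, 0)) =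
          maxCoreF n (numbers.take n) := by
        simp [List.getD_eq_getElem?_getD, hnk]
      rw [h1, h2, h3, h4]

-- B's outer loop fills the table with exactly A's prefix results
theorem alt_table (numbers : List Int) :
    ∀ (m k : Nat), 2 ≤ k → k + m ≤ numbers.length + 1 →
      (List.range' k m).foldl (fun res j => res ++ [altBest numbers res j])
          ((List.range k).map (fun n => maxCoreF n (numbers.take n))) =
        (List.range (k + m)).map (fun n => maxCoreF n (numbers.take n)) := by
  intro m
  induction m with
  | zero => intro k _ _; simp
  | succ m ih =>
      intro k hk2 hkm
      rw [List.range'_succ, List.foldl_cons]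
      have hstep : altBest numbers ((List.range k).map (fun n => maxCoreF n (numbers.take n))) k =
          maxCoreF k (numbers.take k) :=
        (maxCoreF_take_eq_altBest numbers k (by omega) (by omega)).symm
      have happ : ((List.range k).map (fun n => maxCoreF n (numbers.take n))) ++
          [altBest numbers ((List.range k).map (fun n => maxCoreF n (numbers.take n))) k] =
          (List.range (k + 1)).map (fun n => maxCoreF n (numbers.take n)) := by
        rw [hstep, List.range_succ, List.map_append]; simp
      rw [happ]
      have hsum : k + (m + 1) = k + 1 + m := by omega
      rw [hsum]
      exact ih (k + 1) (by omega) (by omega)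

-- ===== VERDICT (by name: the statement is the Claim_ definition above) =====
theorem max_numbers_spec : Claim_equal_max_numbers := by
  intro numbers _
  unfold Spec_max_numbers max_numbers max_numbers_alt
  by_cases h1 : numbers.length = 1
  · rw [if_pos h1]
    obtain ⟨a, l, hl⟩ : ∃ a l, numbers = a :: l := by
      cases numbers with
      | nil => simp at h1
      | cons a l => exact ⟨a, l, rfl⟩
    subst hl
    rw [h1, maxCoreF, if_pos h1]
  · rw [if_neg h1]
    by_cases h0 : numbers.length = 0
    · have : numbers = [] := List.length_eq_zero_iff.mp h0
      subst this
      simp [maxCoreF_nil, altBest]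
    · have hL : 2 ≤ numbers.length := by omega
      have h1' : 1 ≤ numbers.length := by omega
      simp only [if_pos h1']
      have hinit : [((0 : Int), (0 : Int), (0 : Int))] ++
          [((if numbers.headI ≠ 0 then (1 : Int) else 0), numbers.headI, numbers.headI)] =
          (List.range 2).map (fun n => maxCoreF n (numbers.take n)) := by
        have : List.range 2 = [0, 1] := by decide
        rw [this]
        simp [maxCoreF_nil, maxCoreF_one_take numbers h1']
      rw [hinit, alt_table numbers (numbers.length - 1) 2 (by omega) (by omega)]
      have h2m : 2 + (numbers.length - 1) = numbers.length + 1 := by omega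
      rw [h2m]
      have hgd : ((List.range (numbers.length + 1)).map
          (fun n => maxCoreF n (numbers.take n))).getD numbers.length (0, 0, 0) =
          maxCoreF numbers.length (numbers.take numbers.length) := by
        simp [List.getD_eq_getElem?_getD]
      rw [hgd, List.take_length]
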